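-- pv_equiv track=rewrite | github.com/KodCode-AI/kodcode | demo/SFT_KodCode_prefill_200_1741214325/cross_verification_SFT_KodCode_prefill_200_1741214325/Prefill_00000007_I/trial_r1_0/solution.py | can_win_game
-- ===== SOURCE A (Python) =====
-- def can_win_game(cevablar):
--     # Initialize the game with one block of each color
--     blue, green, red = 1, 1, 1
--     previous_color = None
--
--     for color in cevablar:
--         # Check if the current move is allowed based on the previous color
--         if previous_color == 'blue':
--             if color != 'blue':
--                 return False
--         elif previous_color == 'green':
--             if color not in ['green', 'red']:
--                 return False
--         elif previous_color == 'red':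
--             # Game should have ended before
--             return False
--
--         # Check if the color is available
--         if (color == 'blue' and blue == 0) or \
--            (color == 'green' and green == 0) or \
--            (color == 'red' and red == 0):
--             return False
--
--         # Remove one block of the chosen color
--         if color == 'blue':
--             blue -= 1
--         elif color == 'green':
--             green -= 1
--         elif color == 'red':
--             red -= 1
--
--         # Check for winning conditions after this move
--         win = False
--         if color == 'blue':
--             # Next player must move blue, but if there are none, they lose
--             if blue == 0:
--                 win = True
--         elif color == 'green':
--             # Next player can move green or red; if both are empty, they lose
--             if green == 0 and red == 0:
--                 win = True
--         elif color == 'red':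
--             # Win only if all blocks are removed with this move
--             if blue == 0 and green == 0 and red == 0:
--                 win = True
--             else:
--                 # Removing red with other blocks left is a losing move
--                 return False
--
--         if win:
--             return True
--
--         previous_color = color
--
--     # No winning move found in the sequence
--     return False
-- ===== SOURCE B (Python) =====
-- def can_win_game(cevablar):
--     # Single-pass scan: since every block count starts at 1, the first
--     # recognized color fully determines the result (blue wins, green/red lose).
--     for color in cevablar:
--         if color == 'blue':
--             return True
--         if color == 'green' or color == 'red':
--             return False
--     return False
-- ===== Notes on version B (the rewrite author's own statement) =====
-- stated objective: simpler
-- what changed: Replaced the stateful block-count/previous-color simulation with a stateless single scan that decides on the first recognized color (blue wins, green/red lose), exploiting that all counts start at 1.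
import Mathlib
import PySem

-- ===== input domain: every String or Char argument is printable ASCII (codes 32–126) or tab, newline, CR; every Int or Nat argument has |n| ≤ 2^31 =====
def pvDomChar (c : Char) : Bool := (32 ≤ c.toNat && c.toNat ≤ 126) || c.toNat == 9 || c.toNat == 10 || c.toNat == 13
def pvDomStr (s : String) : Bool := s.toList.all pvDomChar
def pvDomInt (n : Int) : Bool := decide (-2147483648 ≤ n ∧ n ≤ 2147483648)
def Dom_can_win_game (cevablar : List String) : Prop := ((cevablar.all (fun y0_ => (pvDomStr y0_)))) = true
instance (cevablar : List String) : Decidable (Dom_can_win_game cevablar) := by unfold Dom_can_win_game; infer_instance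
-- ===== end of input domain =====

-- B replaces A's stateful block-count simulation by a stateless single scan
-- deciding on the first recognized color (simpler, same O(n) cost).


-- ===== PORT A =====
-- Literal transliteration of A's loop: state (blue, green, red, previous_color),
-- early returns become Bool results, the loop is structural recursion on the list.
-- The three previous-color early-return checks are condensed into one guard so the
-- shared loop body appears once (exactly A's fall-through behaviour).
def can_win_game_go (cevablar : List String) (blue green red : Int)
    (previous_color : Option String) : Bool :=
  match cevablar with
  | [] => false   -- no winning move found in the sequence
  | color :: rest =>
    -- check if the current move is allowed based on the previous color
    if (if previous_color = some "blue" then color ≠ "blue"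
        else if previous_color = some "green" then color ≠ "green" ∧ color ≠ "red"
        else previous_color = some "red") then false
    -- check if the color is available
    else if (color = "blue" ∧ blue = 0) ∨ (color = "green" ∧ green = 0) ∨
            (color = "red" ∧ red = 0) then false
    else
      -- remove one block of the chosen color
      let blue' := if color = "blue" then blue - 1 else blue
      let green' := if color = "green" then green - 1 else green
      let red' := if color = "red" then red - 1 else red
      -- check for winning conditions after this move
      if color = "blue" then
        if blue' = 0 then true
        else can_win_game_go rest blue' green' red' (some color)
      else if color = "green" then
        if green' = 0 ∧ red' = 0 then true
        else can_win_game_go rest blue' green' red' (some color)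
      else if color = "red" then
        if blue' = 0 ∧ green' = 0 ∧ red' = 0 then true
        else false   -- removing red with other blocks left is a losing move
      else can_win_game_go rest blue' green' red' (some color)
def can_win_game (cevablar : List String) : Bool :=
  can_win_game_go cevablar 1 1 1 none

-- ===== PORT B =====
def can_win_game_alt (cevablar : List String) : Bool :=
  match cevablar with
  | [] => false
  | color :: rest =>
    if color = "blue" then true
    else if color = "green" ∨ color = "red" then false
    else can_win_game_alt rest

-- ===== PRECONDITION & SPEC =====
def Spec_can_win_game (cevablar : List String) (out : Bool) : Prop := out = can_win_game_alt cevablar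
instance (cevablar : List String) (out : Bool) : Decidable (Spec_can_win_game cevablar out) := by unfold Spec_can_win_game; infer_instance

-- ===== CLAIM (what is proved, stated in full; the proofs are below) =====
def Claim_equal_can_win_game : Prop := ∀ (cevablar : List String), Dom_can_win_game cevablar → Spec_can_win_game cevablar (can_win_game cevablar)

-- ===== LEMMAS AND PROOFS =====
-- After A consumes a 'green' move, the state is (blue,green,red)=(1,0,1) with
-- previous_color 'green'; from there every continuation returns false.
theorem can_win_game_green_dead (l : List String) :
    can_win_game_go l 1 0 1 (some "green") = false := by
  cases l with
  | nil => simp [can_win_game_go]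
  | cons c r =>
    by_cases h1 : c = "green"
    · simp [can_win_game_go, h1]
    · by_cases h2 : c = "red"
      · simp [can_win_game_go, h2]
      · simp [can_win_game_go, h1, h2]

-- Main invariant: from the initial counts (1,1,1) and a previous color that is
-- none of the three recognized ones, A's loop computes exactly B's scan.
theorem can_win_game_go_inv (l : List String) :
    ∀ p : Option String, p ≠ some "blue" → p ≠ some "green" → p ≠ some "red" →
    can_win_game_go l 1 1 1 p = can_win_game_alt l := by
  induction l with
  | nil => intro p _ _ _; simp [can_win_game_go, can_win_game_alt]
  | cons color rest ih =>
    intro p h1 h2 h3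
    by_cases hb : color = "blue"
    · simp [can_win_game_go, can_win_game_alt, hb, h1, h2, h3]
    · by_cases hg : color = "green"
      · simp [can_win_game_go, can_win_game_alt, hg, h1, h2, h3,
              can_win_game_green_dead]
      · by_cases hr : color = "red"
        · simp [can_win_game_go, can_win_game_alt, hr, h1, h2, h3]
        · have := ih (some color) (by simpa using hb) (by simpa using hg)
            (by simpa using hr)
          simp [can_win_game_go, can_win_game_alt, hb, hg, hr, h1, h2, h3, this]

-- ===== VERDICT (by name: the statement is the Claim_ definition above) =====
theorem can_win_game_spec : Claim_equal_can_win_game := by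
  intro cevablar _
  unfold Spec_can_win_game can_win_game
  exact can_win_game_go_inv cevablar none (by simp) (by simp) (by simp)
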